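-- pv_equiv track=rewrite | github.com/levani-b/leetcode-solutions | LC-3761-MinimumAbsoluteDistanceBetweenMirrorPairs.py | minMirrorPairDistance
-- ===== SOURCE A (Python) =====
-- from typing import List
--
-- def minMirrorPairDistance(nums: List[int]) -> int:
--     def reverse(num):
--         reversed_num = 0
--         while num > 0:
--             digit = num % 10
--             reversed_num = (reversed_num * 10) + digit
--             num //= 10
--         return reversed_num
--
--     reversed_map = {}
--     min_dist = float('inf')
--
--     for i, num in enumerate(nums):
--         if num in reversed_map:
--             min_dist = min(min_dist, i - reversed_map[num])
--
--         rev = reverse(num)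
--         reversed_map[rev] = i
--
--     return min_dist if min_dist != float('inf') else -1
-- ===== SOURCE B (Python) =====
-- from typing import List
--
-- def minMirrorPairDistance(nums: List[int]) -> int:
--     def reverse(num):
--         reversed_num = 0
--         while num > 0:
--             digit = num % 10
--             reversed_num = (reversed_num * 10) + digit
--             num //= 10
--         return reversed_num
--
--     best = -1
--     for i, x in enumerate(nums):
--         for j, y in enumerate(nums):
--             if j < i and reverse(y) == x:
--                 d = i - j
--                 if best == -1 or d < best:
--                     best = d
--     return best
-- ===== Notes on version B (the rewrite author's own statement) =====
-- stated objective: alternative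
-- what changed: Replaces the single-pass hashmap of reversed values with a brute-force double scan over all index pairs, tracking the minimum distance with a -1 sentinel instead of float('inf').
import Mathlib
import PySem

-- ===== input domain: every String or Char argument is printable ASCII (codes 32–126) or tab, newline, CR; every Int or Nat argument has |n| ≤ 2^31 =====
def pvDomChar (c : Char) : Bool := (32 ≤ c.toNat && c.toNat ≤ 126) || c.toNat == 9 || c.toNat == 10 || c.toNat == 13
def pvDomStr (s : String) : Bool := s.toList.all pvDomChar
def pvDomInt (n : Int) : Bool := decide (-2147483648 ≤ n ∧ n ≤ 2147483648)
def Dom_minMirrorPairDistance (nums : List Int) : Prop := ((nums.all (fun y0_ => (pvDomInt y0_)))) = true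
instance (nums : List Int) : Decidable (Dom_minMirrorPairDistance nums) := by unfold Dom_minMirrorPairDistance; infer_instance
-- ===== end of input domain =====

-- B replaces A's single-pass reversed-value hashmap with a brute-force scan over all index pairs (-1 sentinel instead of float('inf')); same return value, no speed claim.


-- ===== PORT A =====
-- the inner 'reverse' helper: while num > 0: reversed_num = reversed_num*10 + num%10; num //= 10
def revGo (num acc : Int) : Int :=
  if h : 0 < num then
    revGo (PySem.Int.floordiv num 10) (acc * 10 + PySem.Int.mod num 10)
  else acc
termination_by num.toNat
decreasing_by
  rw [PySem.Int.floordiv_eq_ediv_of_pos (by norm_num)]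
  omega

def minMirrorPairDistance (nums : List Int) : Int :=
  -- float('inf') sentinel modelled as Option Int (none = inf); dict = PySem.Dict
  let r := (PySem.List.enumerate nums).foldl
    (fun (st : PySem.Dict Int Int × Option Int) p =>
      let md := match st.1.get? p.2 with
        | some j => some (match st.2 with
            | none => p.1 - j
            | some d => min d (p.1 - j))
        | none => st.2
      (st.1.insert (revGo p.2 0) p.1, md))
    (PySem.Dict.empty, none)
  match r.2 with
  | some d => d
  | none => -1

-- ===== PORT B =====
def minMirrorPairDistance_alt (nums : List Int) : Int :=
  (PySem.List.enumerate nums).foldl (fun best p =>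
    (PySem.List.enumerate nums).foldl (fun best q =>
      if q.1 < p.1 ∧ revGo q.2 0 = p.2 then
        if best = -1 ∨ p.1 - q.1 < best then p.1 - q.1 else best
      else best) best) (-1)

-- ===== PRECONDITION & SPEC =====
def Spec_minMirrorPairDistance (nums : List Int) (out : Int) : Prop := out = minMirrorPairDistance_alt nums
instance (nums : List Int) (out : Int) : Decidable (Spec_minMirrorPairDistance nums out) := by unfold Spec_minMirrorPairDistance; infer_instance

-- ===== CLAIM (what is proved, stated in full; the proofs are below) =====
def Claim_equal_minMirrorPairDistance : Prop := ∀ (nums : List Int), Dom_minMirrorPairDistance nums → Spec_minMirrorPairDistance nums (minMirrorPairDistance nums)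

-- ===== LEMMAS AND PROOFS =====

-- min-with-(-1)-sentinel update used by B
def upd (b d : Int) : Int := if b = -1 ∨ d < b then d else b

lemma upd_upd (b d1 d2 : Int) (h : d2 < d1) : upd (upd b d1) d2 = upd b d2 := by
  unfold upd; split_ifs <;> omega

-- last index j such that revGo y 0 = x among indexed pairs
def lastIn (l : List (Int × Int)) (x : Int) : Option Int :=
  l.foldl (fun o q => if revGo q.2 0 = x then some q.1 else o) none

lemma lastIn_acc (l : List (Int × Int)) (x : Int) (o : Option Int) :
    l.foldl (fun o q => if revGo q.2 0 = x then some q.1 else o) o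
      = match lastIn l x with | none => o | some j => some j := by
  induction l generalizing o with
  | nil => simp [lastIn]
  | cons q l ih =>
    rw [List.foldl_cons]
    conv_rhs => rw [lastIn, List.foldl_cons]
    rw [ih, ih]
    rcases lastIn l x with _ | j <;> by_cases hq : revGo q.2 0 = x <;> simp [hq]

lemma lastIn_cons (q : Int × Int) (l : List (Int × Int)) (x : Int) :
    lastIn (q :: l) x
      = match lastIn l x with
        | none => if revGo q.2 0 = x then some q.1 else none
        | some j => some j := by
  conv_lhs => rw [lastIn, List.foldl_cons]
  rw [lastIn_acc]

lemma lastIn_mem (l : List (Int × Int)) (x : Int) (j : Int)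
    (h : lastIn l x = some j) : ∃ q ∈ l, q.1 = j := by
  induction l with
  | nil => simp [lastIn] at h
  | cons q l ih =>
    rw [lastIn_cons] at h
    rcases hl : lastIn l x with _ | j'
    · rw [hl] at h
      by_cases hq : revGo q.2 0 = x
      · rw [if_pos hq] at h
        exact ⟨q, by simp, by injection h⟩
      · rw [if_neg hq] at h; simp at h
    · rw [hl] at h
      have hj : j' = j := by injection h
      obtain ⟨p, hp, hpj⟩ := ih (by rw [hl, hj])
      exact ⟨p, by simp [hp], hpj⟩

lemma lastIn_append_singleton (l : List (Int × Int)) (q : Int × Int) (x : Int) :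
    lastIn (l ++ [q]) x = if revGo q.2 0 = x then some q.1 else lastIn l x := by
  unfold lastIn
  rw [List.foldl_append, List.foldl_cons, List.foldl_nil]

-- folding B's update over a strictly-increasing-index list equals a single update at the last match
lemma updfold (l : List (Int × Int)) (x i b : Int)
    (hpw : l.Pairwise (fun p q => p.1 < q.1)) :
    l.foldl (fun b q => if revGo q.2 0 = x then upd b (i - q.1) else b) b
      = match lastIn l x with | none => b | some j => upd b (i - j) := by
  induction l generalizing b with
  | nil => simp [lastIn]
  | cons q l ih =>
    have hpw' := (List.pairwise_cons.mp hpw).2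
    have hlt := (List.pairwise_cons.mp hpw).1
    rw [List.foldl_cons, ih _ hpw', lastIn_cons]
    rcases hl : lastIn l x with _ | j
    · by_cases hq : revGo q.2 0 = x <;> simp [hq]
    · simp only
      by_cases hq : revGo q.2 0 = x
      · rw [if_pos hq]
        have : q.1 < j := by
          obtain ⟨p, hp, hpj⟩ := lastIn_mem l x j hl
          exact hpj ▸ hlt p hp
        exact upd_upd b (i - q.1) (i - j) (by omega)
      · rw [if_neg hq]

lemma mem_enum_fst_lt {α : Type} (ys : List α) (p : Int × α)
    (hp : p ∈ PySem.List.enumerate ys 0) : 0 ≤ p.1 ∧ p.1 < (ys.length : Int) := by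
  obtain ⟨k, hk, rfl⟩ := (PySem.List.mem_enumerate_iff ys 0 p).mp hp
  refine ⟨by simp, by simp; omega⟩

lemma enum_pairwise_fst {α : Type} (ys : List α) :
    (PySem.List.enumerate ys 0).Pairwise (fun p q : Int × α => p.1 < q.1) :=
  PySem.List.pairwise_lt_enumerate ys 0

-- B on ys ++ [x] : brute-force outer step decomposes into B on ys plus one scan of ys
lemma alt_snoc (ys : List Int) (x : Int) :
    minMirrorPairDistance_alt (ys ++ [x])
      = (PySem.List.enumerate ys).foldl
          (fun b q => if revGo q.2 0 = x then upd b ((ys.length : Int) - q.1) else b)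
          (minMirrorPairDistance_alt ys) := by
  unfold minMirrorPairDistance_alt
  rw [PySem.List.enumerate_append]
  simp only [PySem.List.enumerate_cons, PySem.List.enumerate_nil, zero_add]
  rw [List.foldl_append, List.foldl_cons, List.foldl_nil]
  -- outer fold over enumerate ys: the appended element never fires (its index is ≥ every p.1)
  have houter :
      (PySem.List.enumerate ys).foldl
        (fun best p =>
          (PySem.List.enumerate ys ++ [((ys.length : Int), x)]).foldl (fun best q =>
            if q.1 < p.1 ∧ revGo q.2 0 = p.2 then
              if best = -1 ∨ p.1 - q.1 < best then p.1 - q.1 else best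
            else best) best) (-1)
      = (PySem.List.enumerate ys).foldl
        (fun best p =>
          (PySem.List.enumerate ys).foldl (fun best q =>
            if q.1 < p.1 ∧ revGo q.2 0 = p.2 then
              if best = -1 ∨ p.1 - q.1 < best then p.1 - q.1 else best
            else best) best) (-1) := by
    apply PySem.List.foldl_congr_mem
    intro acc p hp
    rw [List.foldl_append, List.foldl_cons, List.foldl_nil]
    have := mem_enum_fst_lt ys p hp
    rw [if_neg (by simp; omega)]
  rw [houter]
  -- the final outer step (index = ys.length): appended element guard fails; inner guard q.1 < len always holds
  rw [List.foldl_append, List.foldl_cons, List.foldl_nil]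
  rw [if_neg (by simp)]
  apply PySem.List.foldl_congr_mem
  intro acc q hq
  have := mem_enum_fst_lt ys q hq
  rw [upd]
  by_cases hc : revGo q.2 0 = x
  · rw [if_pos ⟨by omega, hc⟩, if_pos hc]
  · rw [if_neg (by tauto), if_neg hc]

-- A's fold state on ys
def aState (ys : List Int) : PySem.Dict Int Int × Option Int :=
  (PySem.List.enumerate ys).foldl
    (fun (st : PySem.Dict Int Int × Option Int) p =>
      let md := match st.1.get? p.2 with
        | some j => some (match st.2 with
            | none => p.1 - j
            | some d => min d (p.1 - j))
        | none => st.2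
      (st.1.insert (revGo p.2 0) p.1, md))
    (PySem.Dict.empty, none)

lemma aState_snoc (ys : List Int) (x : Int) :
    aState (ys ++ [x]) =
      ((aState ys).1.insert (revGo x 0) (ys.length : Int),
       match (aState ys).1.get? x with
        | some j => some (match (aState ys).2 with
            | none => (ys.length : Int) - j
            | some d => min d ((ys.length : Int) - j))
        | none => (aState ys).2) := by
  unfold aState
  rw [PySem.List.enumerate_append]
  simp only [PySem.List.enumerate_cons, PySem.List.enumerate_nil, zero_add]
  rw [List.foldl_append, List.foldl_cons, List.foldl_nil]

-- the main invariant
lemma main_inv (ys : List Int) :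
    (∀ v, (aState ys).1.get? v = lastIn (PySem.List.enumerate ys) v) ∧
    (((aState ys).2 = none ∧ minMirrorPairDistance_alt ys = -1) ∨
     (∃ d, (aState ys).2 = some d ∧ minMirrorPairDistance_alt ys = d ∧ 1 ≤ d)) := by
  induction ys using List.reverseRecOn with
  | nil =>
    constructor
    · intro v; simp [aState, lastIn, PySem.List.enumerate]
    · left; constructor <;> rfl
  | append_singleton ys x ih =>
    obtain ⟨ihm, ihr⟩ := ih
    have hsnoc := aState_snoc ys x
    have haltd := alt_snoc ys x
    rw [updfold _ _ _ _ (enum_pairwise_fst ys)] at haltd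
    constructor
    · intro v
      rw [hsnoc]
      simp only
      rw [PySem.Dict.get?_insert, PySem.List.enumerate_append]
      simp only [PySem.List.enumerate_cons, PySem.List.enumerate_nil, zero_add]
      rw [lastIn_append_singleton]
      simp only
      by_cases hv : revGo x 0 = v
      · rw [if_pos hv, if_pos hv.symm]
      · rw [if_neg hv, if_neg (fun h => hv h.symm), ihm]
    · rw [hsnoc, haltd]
      simp only
      rw [ihm x]
      rcases hl : lastIn (PySem.List.enumerate ys) x with _ | j
      · simp only
        exact ihr
      · simp only
        have hjlt : j < (ys.length : Int) := by
          obtain ⟨q, hq, hqj⟩ := lastIn_mem _ _ _ hl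
          have := mem_enum_fst_lt ys q hq
          omega
        rcases ihr with ⟨hnone, halt⟩ | ⟨d, hsome, halt, hd⟩
        · right
          refine ⟨(ys.length : Int) - j, ?_, ?_, by omega⟩
          · rw [hnone]
          · rw [halt, upd, if_pos (Or.inl rfl)]
        · right
          refine ⟨min d ((ys.length : Int) - j), ?_, ?_, by omega⟩
          · rw [hsome]
          · rw [halt, upd]
            by_cases hc : (ys.length : Int) - j < d
            · rw [if_pos (Or.inr hc)]; omega
            · rw [if_neg (by omega)]; omega

-- ===== VERDICT (by name: the statement is the Claim_ definition above) =====
theorem minMirrorPairDistance_spec : Claim_equal_minMirrorPairDistance := by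
  intro nums _
  unfold Spec_minMirrorPairDistance minMirrorPairDistance
  have h := (main_inv nums).2
  show (match (aState nums).2 with | some d => d | none => -1) = _
  rcases h with ⟨hn, ha⟩ | ⟨d, hs, ha, _⟩
  · rw [hn, ha]
  · rw [hs, ha]
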